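-- pv_equiv track=rewrite | github.com/lbechberger/ConceptualSpaces | conceptual_spaces/cs/cs.py | _check_domain_structure
-- ===== SOURCE A (Python) =====
-- def _check_domain_structure(domains, n_dim):
--     """Checks whether the domain structure is valid."""
--
--     vals = [val for domain in domains.values() for val in domain] # flatten values
--
--     # each dimension must appear in exactly one domain
--     for i in range(n_dim):
--         if vals.count(i) != 1:
--             return False
--
--     # we need the correct number of dimensions in total
--     if len(vals) != n_dim:
--         return False
--
--     # there are no empty domains allowed
--     for (k,v) in domains.items():
--         if v == []:
--             return False
--
--     return True
-- ===== SOURCE B (Python) =====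
-- def _check_domain_structure(domains, n_dim):
--     """Checks whether the domain structure is valid."""
--     vals = [val for domain in domains.values() for val in domain]
--     return (len(vals) == n_dim
--             and sorted(vals) == list(range(n_dim))
--             and not any(v == [] for v in domains.values()))
-- ===== Notes on version B (the rewrite author's own statement) =====
-- stated objective: simpler
-- what changed: Replaces the per-dimension count loop plus the length check with a single sort-and-compare against list(range(n_dim)) (a permutation test), keeping the length and empty-domain guards.
import Mathlib
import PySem

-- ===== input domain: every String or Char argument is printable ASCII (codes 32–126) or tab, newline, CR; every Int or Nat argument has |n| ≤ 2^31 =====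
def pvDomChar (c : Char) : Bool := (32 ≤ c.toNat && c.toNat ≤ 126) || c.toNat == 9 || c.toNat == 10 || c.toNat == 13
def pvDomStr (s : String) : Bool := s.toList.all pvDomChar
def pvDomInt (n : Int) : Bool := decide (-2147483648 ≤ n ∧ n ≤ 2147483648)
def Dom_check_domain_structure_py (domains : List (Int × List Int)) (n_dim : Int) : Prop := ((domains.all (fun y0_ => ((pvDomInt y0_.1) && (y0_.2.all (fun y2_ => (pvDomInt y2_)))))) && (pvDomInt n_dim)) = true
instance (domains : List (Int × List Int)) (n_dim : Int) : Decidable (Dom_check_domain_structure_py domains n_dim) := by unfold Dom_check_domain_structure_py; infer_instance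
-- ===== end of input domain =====

-- B replaces A's per-dimension count loop plus length check with one sort-and-compare
-- against range(n_dim); objective: simpler.

-- ===== PORT A =====
-- the 'for i in range(n_dim): if vals.count(i) != 1: return False' loop; true = no early return
def aDimLoop (vals : List Int) : List Int → Bool
  | [] => true
  | i :: rest => if vals.count i ≠ 1 then false else aDimLoop vals rest

-- the 'for (k,v) in domains.items(): if v == []: return False' loop; true = early return False
def aEmptyLoop : List (Int × List Int) → Bool
  | [] => false
  | (_, v) :: rest => if v = [] then true else aEmptyLoop rest

def check_domain_structure_py (domains : List (Int × List Int)) (n_dim : Int) : Bool :=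
  let vals := (domains.map Prod.snd).flatten
  if aDimLoop vals (PySem.List.pyRange 0 n_dim 1) then
    if (vals.length : Int) ≠ n_dim then false
    else if aEmptyLoop domains then false
    else true
  else false

-- ===== PORT B =====
def check_domain_structure_py_alt (domains : List (Int × List Int)) (n_dim : Int) : Bool :=
  let vals := (domains.map Prod.snd).flatten
  decide ((vals.length : Int) = n_dim)
    && decide (PySem.List.sorted vals (fun x => x) false = PySem.List.pyRange 0 n_dim 1)
    && !(domains.any (fun kv => decide (kv.2 = [])))

-- ===== PRECONDITION & SPEC =====
def Spec_check_domain_structure_py (domains : List (Int × List Int)) (n_dim : Int) (out : Bool) : Prop := out = check_domain_structure_py_alt domains n_dim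
instance (domains : List (Int × List Int)) (n_dim : Int) (out : Bool) : Decidable (Spec_check_domain_structure_py domains n_dim out) := by unfold Spec_check_domain_structure_py; infer_instance

-- ===== CLAIM (what is proved, stated in full; the proofs are below) =====
def Claim_equal_check_domain_structure_py : Prop := ∀ (domains : List (Int × List Int)) (n_dim : Int), Dom_check_domain_structure_py domains n_dim → Spec_check_domain_structure_py domains n_dim (check_domain_structure_py domains n_dim)

-- ===== LEMMAS AND PROOFS =====

theorem aDimLoop_eq_true (vals : List Int) (R : List Int) :
    aDimLoop vals R = true ↔ ∀ i ∈ R, vals.count i = 1 := by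
  induction R with
  | nil => simp [aDimLoop]
  | cons i rest ih =>
    by_cases h : vals.count i = 1 <;> simp [aDimLoop, h, ih]

theorem aEmptyLoop_eq_any (domains : List (Int × List Int)) :
    aEmptyLoop domains = domains.any (fun kv => decide (kv.2 = [])) := by
  induction domains with
  | nil => rfl
  | cons kv rest ih =>
    obtain ⟨k, v⟩ := kv
    by_cases h : v = [] <;> simp [aEmptyLoop, h, ih]

-- with the total length right, 'each i in range(n) occurs once' = 'sorted(vals) == range(n)'
theorem dim_iff_sorted (vals : List Int) (n : Int) (hlen : (vals.length : Int) = n) :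
    (aDimLoop vals (PySem.List.pyRange 0 n 1) = true) ↔
      PySem.List.sorted vals (fun x => x) false = PySem.List.pyRange 0 n 1 := by
  rw [aDimLoop_eq_true]
  constructor
  · intro h
    have hsub : List.Subperm (PySem.List.pyRange 0 n 1) vals := by
      refine (PySem.List.nodup_pyRange_one 0 n).subperm ?_
      intro x hx
      have := h x hx
      exact List.count_pos_iff.mp (by omega)
    have hperm : List.Perm (PySem.List.pyRange 0 n 1) vals := by
      refine hsub.perm_of_length_le ?_
      have h1 : (PySem.List.pyRange 0 n 1).length = (n - 0).toNat :=
        PySem.List.length_pyRange_one 0 n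
      omega
    exact PySem.List.sorted_eq_of_perm_of_pairwise_lt (hp := hperm)
      (hs := PySem.List.pairwise_lt_pyRange_one 0 n)
  · intro hs i hi
    have hperm : List.Perm (PySem.List.pyRange 0 n 1) vals := by
      rw [← hs]; exact PySem.List.sorted_perm vals (fun x => x) false
    rw [← hperm.count_eq]
    exact List.count_eq_one_of_mem (PySem.List.nodup_pyRange_one 0 n) hi

theorem both_eq (domains : List (Int × List Int)) (n : Int) (vals : List Int) :
    (if aDimLoop vals (PySem.List.pyRange 0 n 1) then
        if (vals.length : Int) ≠ n then false
        else if aEmptyLoop domains then false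
        else true
      else false)
    = (decide ((vals.length : Int) = n)
        && decide (PySem.List.sorted vals (fun x => x) false = PySem.List.pyRange 0 n 1)
        && !(domains.any (fun kv => decide (kv.2 = [])))) := by
  rw [← aEmptyLoop_eq_any]
  by_cases hlen : (vals.length : Int) = n
  · by_cases hs : PySem.List.sorted vals (fun x => x) false = PySem.List.pyRange 0 n 1
    · have hd := (dim_iff_sorted vals n hlen).mpr hs
      by_cases he : aEmptyLoop domains = true <;> simp [hd, hlen, hs, he]
    · have hd : aDimLoop vals (PySem.List.pyRange 0 n 1) = false := by
        cases hcase : aDimLoop vals (PySem.List.pyRange 0 n 1) with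
        | false => rfl
        | true => exact absurd ((dim_iff_sorted vals n hlen).mp hcase) hs
      simp [hd, hs]
  · by_cases hd : aDimLoop vals (PySem.List.pyRange 0 n 1) = true <;> simp [hlen, hd]

-- ===== VERDICT (by name: the statement is the Claim_ definition above) =====
theorem check_domain_structure_py_spec : Claim_equal_check_domain_structure_py := by
  intro domains n _
  show check_domain_structure_py domains n = check_domain_structure_py_alt domains n
  exact both_eq domains n ((domains.map Prod.snd).flatten)
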